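-- pv_equiv track=rewrite | github.com/Evansbee/adventofcode | aoc2018/day23.py | does_set_overlap
-- ===== SOURCE A (Python) =====
-- def get_manhattan_3(a, b):
--     return abs(b[0] - a[0]) + abs(b[1] - a[1]) + abs(b[2] - a[2])
--
-- def does_set_overlap(nanobot_dict):
--     if len(nanobot_dict) == 1:
--         return True
--
--     all_locations = list(nanobot_dict.keys())
--
--     while len(all_locations) > 0:
--         location = all_locations[-1]
--         all_locations = all_locations[:-1]
--         strength = nanobot_dict[location]
--         del nanobot_dict[location]
--         for k, v in nanobot_dict.items():
--             distance = get_manhattan_3(location, k)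
--             if distance > (v + strength):
--                 return False
--     return True
-- ===== SOURCE B (Python) =====
-- def does_set_overlap(nanobot_dict):
--     # Map L1 balls to the 4 "Chebyshev" coordinates u = x + sy*y + sz*z:
--     # all balls pairwise overlap iff for each coordinate a[i] <= b[j] for all i != j,
--     # where a[i] = u_i - r_i, b[j] = u_j + r_j (i=j excluded exactly, via argmin/second-min).
--     bots = list(nanobot_dict.items())
--     n = len(bots)
--     if n <= 1:
--         return True
--     for sy, sz in ((1, 1), (1, -1), (-1, 1), (-1, -1)):
--         a = [p[0] + sy * p[1] + sz * p[2] - r for p, r in bots]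
--         b = [p[0] + sy * p[1] + sz * p[2] + r for p, r in bots]
--         j1 = min(range(n), key=lambda j: b[j])
--         b1 = b[j1]
--         b2 = min(b[j] for j in range(n) if j != j1)
--         if any(a[i] > b1 for i in range(n) if i != j1) or a[j1] > b2:
--             return False
--     return True
-- ===== Notes on version B (the rewrite author's own statement) =====
-- stated objective: alternative
-- what changed: Replaced the destructive pairwise Manhattan-distance scan by one pass per Chebyshev coordinate: each L1 ball becomes an interval in the four coordinates x+sy*y+sz*z, and all balls pairwise overlap iff per coordinate every lower end a[i] stays below every other bot's upper end b[j] (checked exactly with argmin/second-min, so i=j is excluded and negative radii are handled).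
-- outside the precondition, e.g. on does_set_overlap({(0, 0, 0): 0, (100,): 0, (5, 5, 5): 0}): A returns False, B raises IndexError
import Mathlib
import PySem

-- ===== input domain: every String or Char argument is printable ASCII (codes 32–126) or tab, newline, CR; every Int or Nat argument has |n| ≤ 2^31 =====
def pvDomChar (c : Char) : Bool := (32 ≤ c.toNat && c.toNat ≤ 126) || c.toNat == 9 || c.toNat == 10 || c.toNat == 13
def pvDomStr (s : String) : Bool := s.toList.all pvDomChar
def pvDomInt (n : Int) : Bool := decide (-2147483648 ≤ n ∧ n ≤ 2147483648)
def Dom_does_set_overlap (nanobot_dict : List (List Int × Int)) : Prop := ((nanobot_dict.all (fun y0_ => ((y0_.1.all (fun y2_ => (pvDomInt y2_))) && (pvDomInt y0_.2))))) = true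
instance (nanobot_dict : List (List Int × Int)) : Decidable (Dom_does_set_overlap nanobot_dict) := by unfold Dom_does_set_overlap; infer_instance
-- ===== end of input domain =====

-- B is an alternative algorithm: instead of A's destructive pairwise scan it checks,
-- per Chebyshev coordinate x + sy*y + sz*z of the L1 metric, that every lower end
-- u_i - r_i stays below every other bot's upper end u_j + r_j (first-argmin /
-- second-min, so that i = j is excluded exactly).  Python A empties its dict
-- argument in place; the equivalence proved here is about the return value only
-- (B does not mutate its argument).

-- ===== PORT A =====
def get_manhattan_3 (a b : List Int) : Int :=
  |PySem.List.pyGetD b 0 0 - PySem.List.pyGetD a 0 0| +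
  |PySem.List.pyGetD b 1 0 - PySem.List.pyGetD a 1 0| +
  |PySem.List.pyGetD b 2 0 - PySem.List.pyGetD a 2 0|

-- the dict argument as its canonical items list (first binding of a key wins, per the convention)
def pvItems : List (List Int × Int) → List (List Int × Int)
  | [] => []
  | p :: rest => p :: pvItems (rest.filter (fun q => q.1 != p.1))
termination_by l => l.length
decreasing_by
  simp only [List.length_unattach]
  exact Nat.lt_succ_of_le (le_of_le_of_eq (List.length_filter_le _ _) (by simp))

-- A's while loop: pop the last location, look up and delete its entry, compare with the rest
def pvLoopA (locs : List (List Int)) (d : List (List Int × Int)) : Bool :=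
  match hL : locs.getLast? with
  | none => true
  | some location =>
    let strength := (((d.find? (fun p => p.1 == location)).map (·.2)).getD 0)
    let d' := d.filter (fun p => p.1 != location)
    if d'.any (fun p => decide (p.2 + strength < get_manhattan_3 location p.1)) then false
    else pvLoopA locs.dropLast d'
termination_by locs.length
decreasing_by
  have h0 : locs ≠ [] := by rintro rfl; simp at hL
  cases locs with
  | nil => exact absurd rfl h0
  | cons x xs => simp

def does_set_overlap (nanobot_dict : List (List Int × Int)) : Bool :=
  let d := pvItems nanobot_dict
  if d.length == 1 then true
  else pvLoopA (d.map (·.1)) d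

-- ===== PORT B =====
def pvDot (sy sz : Int) (p : List Int) : Int :=
  PySem.List.pyGetD p 0 0 + sy * PySem.List.pyGetD p 1 0 + sz * PySem.List.pyGetD p 2 0

-- min(range(n), key=lambda j: b[j]) : first index of the minimum
def pvArgmin : List Int → Nat
  | [] => 0
  | [_] => 0
  | x :: y :: t =>
    let j := pvArgmin (y :: t)
    if x ≤ (y :: t).getD j 0 then 0 else j + 1

-- min of a nonempty list
def pvMinL : List Int → Int
  | [] => 0
  | x :: xs => xs.foldl min x

-- one Chebyshev coordinate: both overlap conditions of Source B's loop body
def pvSigmaOk (sy sz : Int) (bots : List (List Int × Int)) : Bool :=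
  let av := bots.map (fun p => pvDot sy sz p.1 - p.2)
  let bv := bots.map (fun p => pvDot sy sz p.1 + p.2)
  let j1 := pvArgmin bv
  let b1 := bv.getD j1 0
  let b2 := pvMinL (bv.eraseIdx j1)
  !((av.zipIdx.any (fun q => q.2 != j1 && decide (b1 < q.1))) || decide (b2 < av.getD j1 0))

def does_set_overlap_alt (nanobot_dict : List (List Int × Int)) : Bool :=
  let bots := pvItems nanobot_dict
  if bots.length ≤ 1 then true
  else [((1 : Int), (1 : Int)), (1, -1), (-1, 1), (-1, -1)].all (fun s => pvSigmaOk s.1 s.2 bots)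

-- ===== PRECONDITION & SPEC =====
-- Pre_ excludes dicts with ≥ 2 distinct keys in which some key has fewer than 3 coordinates:
-- there Python A in general raises IndexError (it returns False only when an earlier pair
-- already fails to overlap), and Python B raises IndexError as well.
def Pre_does_set_overlap (nanobot_dict : List (List Int × Int)) : Prop :=
  (PySem.List.dedup (nanobot_dict.map (·.1))).length ≤ 1 ∨ ∀ p ∈ nanobot_dict, 3 ≤ p.1.length
instance (nanobot_dict : List (List Int × Int)) : Decidable (Pre_does_set_overlap nanobot_dict) := by
  unfold Pre_does_set_overlap; infer_instance

def pvWitness_does_set_overlap : (List (List Int × Int)) := [([0, 0, 0], 4), ([1, 1, 1], 2)]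

def Spec_does_set_overlap (nanobot_dict : List (List Int × Int)) (out : Bool) : Prop := out = does_set_overlap_alt nanobot_dict
instance (nanobot_dict : List (List Int × Int)) (out : Bool) : Decidable (Spec_does_set_overlap nanobot_dict out) := by unfold Spec_does_set_overlap; infer_instance

-- ===== CLAIM (what is proved, stated in full; the proofs are below) =====
def Claim_equal_does_set_overlap : Prop := ∀ (nanobot_dict : List (List Int × Int)), Dom_does_set_overlap nanobot_dict → Pre_does_set_overlap nanobot_dict → Spec_does_set_overlap nanobot_dict (does_set_overlap nanobot_dict)

-- ===== LEMMAS AND PROOFS =====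

-- the pairwise overlap relation both ports decide
def pvRm (p q : List Int × Int) : Prop := get_manhattan_3 q.1 p.1 ≤ p.2 + q.2

theorem pvUnattach_filter (rest : List (List Int × Int)) (p : List Int × Int) :
    (rest.attach.filter (fun x : {q // q ∈ rest} => x.val.1 != p.1)).unattach
      = rest.filter (fun q => q.1 != p.1) := by
  rw [List.unattach_filter (g := fun q => q.1 != p.1) (hf := fun x h => rfl)]
  simp

theorem pvItems_mem {l : List (List Int × Int)} {q : List Int × Int}
    (h : q ∈ pvItems l) : q ∈ l := by
  fun_induction pvItems l with
  | case1 => simp at h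
  | case2 p rest ih =>
    rw [pvUnattach_filter] at ih
    rcases List.mem_cons.1 h with rfl | h2
    · exact List.mem_cons_self
    · exact List.mem_cons_of_mem _ (List.mem_of_mem_filter (ih h2))

theorem pvItems_nodup (l : List (List Int × Int)) : ((pvItems l).map (·.1)).Nodup := by
  fun_induction pvItems l with
  | case1 => simp
  | case2 p rest ih =>
    rw [pvUnattach_filter] at ih
    simp only [List.map_cons, List.nodup_cons]
    refine ⟨?_, ih⟩
    intro hmem
    rcases List.mem_map.1 hmem with ⟨q, hq, hq1⟩
    have := List.of_mem_filter (pvItems_mem hq)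
    simp [hq1] at this

theorem pvLoopA_nil (d : List (List Int × Int)) : pvLoopA [] d = true := by
  rw [pvLoopA]
  split
  · rfl
  · next loc h => simp at h

theorem pvLoopA_concat (locs : List (List Int)) (x : List Int) (d : List (List Int × Int)) :
    pvLoopA (locs ++ [x]) d =
      (if (d.filter (fun p => p.1 != x)).any
            (fun p => decide (p.2 + (((d.find? (fun q => q.1 == x)).map (·.2)).getD 0) < get_manhattan_3 x p.1)) then false
       else pvLoopA locs (d.filter (fun p => p.1 != x))) := by
  rw [pvLoopA]
  split
  · next h => simp at h
  · next loc h =>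
    rw [List.getLast?_concat] at h
    obtain rfl : x = loc := by simpa using h
    rw [List.dropLast_concat]

theorem pvLoopA_iff (d : List (List Int × Int)) (hnd : (d.map (·.1)).Nodup) :
    pvLoopA (d.map (·.1)) d = true ↔ List.Pairwise pvRm d := by
  induction d using List.reverseRecOn with
  | nil => simp [pvLoopA_nil]
  | append_singleton ys p ih =>
    have hmap : (ys ++ [p]).map (·.1) = ys.map (·.1) ++ [p.1] := by simp
    rw [hmap] at hnd
    rw [List.nodup_append] at hnd
    obtain ⟨hnd1, -, hdisj⟩ := hnd
    have hnotin : ∀ q ∈ ys, ¬ q.1 = p.1 := by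
      intro q hq e
      exact hdisj q.1 (List.mem_map_of_mem hq) p.1 (by simp) e
    have hfind : ((ys ++ [p]).find? (fun q => q.1 == p.1)) = some p := by
      rw [List.find?_append]
      have h1 : ys.find? (fun q => q.1 == p.1) = none :=
        List.find?_eq_none.mpr (fun q hq => by simpa using hnotin q hq)
      simp [h1]
    have hfilter : ((ys ++ [p]).filter (fun q => q.1 != p.1)) = ys := by
      rw [List.filter_append]
      have h1 : ys.filter (fun q => q.1 != p.1) = ys :=
        List.filter_eq_self.mpr (fun q hq => by simpa using hnotin q hq)
      simp [h1]
    rw [hmap, pvLoopA_concat, hfilter, hfind]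
    simp only [Option.map_some, Option.getD_some]
    rw [List.pairwise_append]
    split
    · next hany =>
      simp only [Bool.false_eq_true, false_iff]
      rintro ⟨-, -, hall⟩
      rw [List.any_eq_true] at hany
      obtain ⟨q, hq, hcond⟩ := hany
      have h2 := hall q hq p (by simp)
      simp only [pvRm, decide_eq_true_eq] at h2 hcond
      omega
    · next hany =>
      rw [ih hnd1]
      simp only [Bool.not_eq_true, List.any_eq_false] at hany
      constructor
      · intro hp
        refine ⟨hp, List.pairwise_singleton _ _, ?_⟩
        intro a ha b hb
        rcases List.mem_singleton.mp hb with rfl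
        have h := hany a ha
        simp only [decide_eq_false_iff_not, Int.not_lt] at h
        exact h
      · exact fun h => h.1

theorem pvArgmin_lt (bs : List Int) (h : bs ≠ []) : pvArgmin bs < bs.length := by
  fun_induction pvArgmin bs with
  | case1 => exact absurd rfl h
  | case2 => simp
  | case3 => simp
  | case4 x y t j hgt ih => simpa using Nat.succ_lt_succ (ih (by simp))

theorem pvArgmin_min (bs : List Int) : ∀ j, j < bs.length → bs.getD (pvArgmin bs) 0 ≤ bs.getD j 0 := by
  fun_induction pvArgmin bs with
  | case1 => intro j hj; simp at hj
  | case2 a =>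
    intro j hj
    simp only [List.length_singleton] at hj
    interval_cases j
    simp
  | case3 x y t j0 hle ih =>
    intro j hj
    cases j with
    | zero => simp
    | succ k =>
      have h2 := ih k (by simpa using hj)
      simp only [List.getD_cons_zero, List.getD_cons_succ]
      exact le_trans hle h2
  | case4 x y t j0 hgt ih =>
    intro j hj
    cases j with
    | zero =>
      simp only [List.getD_cons_succ, List.getD_cons_zero]
      exact le_of_not_ge hgt
    | succ k =>
      simp only [List.getD_cons_succ]
      exact ih k (by simpa using hj)

theorem pvMinL_le {l : List Int} {x : Int} (h : x ∈ l) : pvMinL l ≤ x := by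
  cases l with
  | nil => simp at h
  | cons a t =>
    simp only [pvMinL]
    have key : ∀ (t : List Int) (a : Int), (t.foldl min a ≤ a) ∧ ∀ y ∈ t, t.foldl min a ≤ y := by
      intro t
      induction t with
      | nil => simp
      | cons b s ih =>
        intro a
        simp only [List.foldl_cons]
        refine ⟨le_trans (ih (min a b)).1 (min_le_left _ _), ?_⟩
        intro y hy
        rcases List.mem_cons.1 hy with rfl | hy
        · exact le_trans (ih (min a y)).1 (min_le_right _ _)
        · exact (ih (min a b)).2 y hy
    rcases List.mem_cons.1 h with rfl | h
    · exact (key t x).1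
    · exact (key t a).2 x h

theorem pvMinL_mem {l : List Int} (h : l ≠ []) : pvMinL l ∈ l := by
  cases l with
  | nil => exact absurd rfl h
  | cons a t =>
    simp only [pvMinL]
    have key : ∀ (t : List Int) (a : Int), t.foldl min a = a ∨ t.foldl min a ∈ t := by
      intro t
      induction t with
      | nil => simp
      | cons b s ih =>
        intro a
        simp only [List.foldl_cons]
        rcases ih (min a b) with he | hm
        · rw [he]
          rcases le_total a b with hab | hba
          · left; exact min_eq_left hab
          · right
            rw [min_eq_right hba]
            exact List.mem_cons_self
        · right; exact List.mem_cons_of_mem _ hm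
    rcases key t a with he | hm
    · simp [he]
    · simp [hm]

theorem pvSigmaOk_iff (sy sz : Int) (bots : List (List Int × Int)) (h2 : 2 ≤ bots.length) :
    pvSigmaOk sy sz bots = true ↔
      ∀ i j (hi : i < bots.length) (hj : j < bots.length), i ≠ j →
        pvDot sy sz (bots[i]'hi).1 - (bots[i]'hi).2
          ≤ pvDot sy sz (bots[j]'hj).1 + (bots[j]'hj).2 := by
  unfold pvSigmaOk
  simp only []
  set av := bots.map (fun p => pvDot sy sz p.1 - p.2) with hav
  set bv := bots.map (fun p => pvDot sy sz p.1 + p.2) with hbv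
  have hlen_a : av.length = bots.length := by rw [hav]; simp
  have hlen_b : bv.length = bots.length := by rw [hbv]; simp
  set j1 := pvArgmin bv with hj1def
  have hbne : bv ≠ [] := by
    intro e
    rw [e] at hlen_b
    simp at hlen_b
    omega
  have hj1 : j1 < bv.length := pvArgmin_lt bv hbne
  have hA : ∀ i (hi : i < bots.length),
      av[i]'(by omega) = pvDot sy sz (bots[i]'hi).1 - (bots[i]'hi).2 := by
    intro i hi; simp [hav]
  have hB : ∀ i (hi : i < bots.length),
      bv[i]'(by omega) = pvDot sy sz (bots[i]'hi).1 + (bots[i]'hi).2 := by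
    intro i hi; simp [hbv]
  have herase_ne : bv.eraseIdx j1 ≠ [] := by
    have hl := List.length_eraseIdx (l := bv) (i := j1)
    rw [if_pos hj1] at hl
    intro e
    rw [e] at hl
    simp at hl
    omega
  rw [Bool.not_eq_true', Bool.or_eq_false_iff, List.any_eq_false, List.forall_mem_zipIdx',
      decide_eq_false_iff_not, Int.not_lt]
  have hgetDj1 : bv.getD j1 0 = bv[j1]'hj1 := List.getD_eq_getElem bv 0 hj1
  have hgetDa : av.getD j1 0 = av[j1]'(by omega) := List.getD_eq_getElem av 0 (by omega)
  constructor
  · rintro ⟨h1, h2c⟩ i j hi hj hij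
    by_cases hi1 : i = j1
    · subst hi1
      have hjne : j ≠ j1 := fun e => hij (e ▸ rfl)
      have hmem : bv[j]'(by omega) ∈ bv.eraseIdx j1 :=
        List.mem_eraseIdx_iff_getElem.mpr ⟨j, by omega, hjne, rfl⟩
      have hle2 : pvMinL (bv.eraseIdx j1) ≤ bv[j]'(by omega) := pvMinL_le hmem
      rw [hgetDa, hA j1 hi] at h2c
      rw [← hB j hj]
      exact le_trans h2c hle2
    · have h1i := h1 i (by omega)
      simp only [Bool.and_eq_true, bne_iff_ne, ne_eq, decide_eq_true_eq, not_and] at h1i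
      have hle1 : av[i]'(by omega) ≤ bv.getD j1 0 := by
        by_contra hc
        exact h1i hi1 (by omega)
      have hle3 : bv[j1]'hj1 ≤ bv[j]'(by omega) := by
        have := pvArgmin_min bv j (by omega)
        rwa [← hj1def, hgetDj1, List.getD_eq_getElem bv 0 (by omega)] at this
      rw [← hA i hi, ← hB j hj]
      calc av[i]'(by omega) ≤ bv.getD j1 0 := hle1
        _ = bv[j1]'hj1 := hgetDj1
        _ ≤ bv[j]'(by omega) := hle3
  · intro hR
    constructor
    · intro i hi
      simp only [Bool.and_eq_true, bne_iff_ne, ne_eq, decide_eq_true_eq, not_and]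
      intro hi1 
      rw [Int.not_lt, hgetDj1]
      rw [hA i (by omega), hB j1 (by omega)]
      exact hR i j1 (by omega) (by omega) hi1
    · have hmem := pvMinL_mem herase_ne
      obtain ⟨j, hjlen, hjne, hje⟩ := List.mem_eraseIdx_iff_getElem.mp hmem
      rw [hgetDa, hA j1 (by omega)]
      rw [← hje, hB j (by omega)]
      exact hR j1 j (by omega) (by omega) (fun e => hjne e.symm)

theorem pv_abs3 (d1 d2 d3 c : Int) :
    |d1| + |d2| + |d3| ≤ c ↔
      (d1 + d2 + d3 ≤ c ∧ d1 + d2 - d3 ≤ c ∧ d1 - d2 + d3 ≤ c ∧ d1 - d2 - d3 ≤ c ∧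
       -d1 + d2 + d3 ≤ c ∧ -d1 + d2 - d3 ≤ c ∧ -d1 - d2 + d3 ≤ c ∧ -d1 - d2 - d3 ≤ c) := by
  rcases abs_cases d1 with ⟨e1, f1⟩ | ⟨e1, f1⟩ <;>
  rcases abs_cases d2 with ⟨e2, f2⟩ | ⟨e2, f2⟩ <;>
  rcases abs_cases d3 with ⟨e3, f3⟩ | ⟨e3, f3⟩ <;> omega

theorem pvPair_iff (p q : List Int × Int) :
    pvRm p q ↔ ∀ s ∈ [((1 : Int), (1 : Int)), (1, -1), (-1, 1), (-1, -1)],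
      pvDot s.1 s.2 p.1 - p.2 ≤ pvDot s.1 s.2 q.1 + q.2 ∧
      pvDot s.1 s.2 q.1 - q.2 ≤ pvDot s.1 s.2 p.1 + p.2 := by
  have h := pv_abs3 (PySem.List.pyGetD p.1 0 0 - PySem.List.pyGetD q.1 0 0)
      (PySem.List.pyGetD p.1 1 0 - PySem.List.pyGetD q.1 1 0)
      (PySem.List.pyGetD p.1 2 0 - PySem.List.pyGetD q.1 2 0) (p.2 + q.2)
  simp only [pvRm, get_manhattan_3, pvDot, List.mem_cons, List.not_mem_nil, or_false] at *
  constructor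
  · intro hm
    have h8 := h.mp hm
    rintro s (rfl | rfl | rfl | rfl) <;> constructor <;> (simp only [one_mul, neg_one_mul]; omega)
  · intro hs
    apply h.mpr
    have h1 := hs (1, 1) (by simp)
    have h2 := hs (1, -1) (by simp)
    have h3 := hs (-1, 1) (by simp)
    have h4 := hs (-1, -1) (by simp)
    simp only [one_mul, neg_one_mul] at h1 h2 h3 h4
    omega

theorem pvA_iff (l : List (List Int × Int)) :
    does_set_overlap l = true ↔ List.Pairwise pvRm (pvItems l) := by
  unfold does_set_overlap
  by_cases h : (pvItems l).length = 1
  · rw [if_pos (by simpa using h)]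
    simp only [true_iff]
    obtain ⟨x, hx⟩ := List.length_eq_one_iff.mp h
    rw [hx]
    exact List.pairwise_singleton _ _
  · rw [if_neg (by simpa using h)]
    exact pvLoopA_iff _ (pvItems_nodup l)

theorem pvB_iff (l : List (List Int × Int)) :
    does_set_overlap_alt l = true ↔ List.Pairwise pvRm (pvItems l) := by
  unfold does_set_overlap_alt
  by_cases h1 : (pvItems l).length ≤ 1
  · rw [if_pos h1]
    simp only [true_iff]
    rcases hx : (pvItems l) with - | ⟨a, - | ⟨b, t⟩⟩
    · exact List.Pairwise.nil
    · exact List.pairwise_singleton _ _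
    · rw [hx] at h1; simp at h1
  · rw [if_neg h1]
    push Not at h1
    rw [List.all_eq_true, List.pairwise_iff_getElem]
    constructor
    · intro hall i j hi hj hij
      rw [pvPair_iff]
      intro s hs
      have hok := (pvSigmaOk_iff s.1 s.2 _ (by omega)).mp (hall s hs)
      exact ⟨hok i j hi hj (by omega), hok j i hj hi (by omega)⟩
    · intro hpw s hs
      rw [pvSigmaOk_iff s.1 s.2 _ (by omega)]
      intro i j hi hj hij
      rcases Nat.lt_or_ge i j with hlt | hge
      · exact ((pvPair_iff _ _).mp (hpw i j hi hj hlt) s hs).1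
      · have hlt2 : j < i := by omega
        exact ((pvPair_iff _ _).mp (hpw j i hj hi hlt2) s hs).2

theorem pv_final (l : List (List Int × Int)) : does_set_overlap l = does_set_overlap_alt l := by
  rw [Bool.eq_iff_iff, pvA_iff, pvB_iff]

-- ===== VERDICT (by name: the statement is the Claim_ definition above) =====
theorem does_set_overlap_spec : Claim_equal_does_set_overlap := by
  intro nanobot_dict _hdom _hpre
  show does_set_overlap nanobot_dict = does_set_overlap_alt nanobot_dict
  exact pv_final nanobot_dict
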